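-- pv_equiv track=rewrite | github.com/kingdomseed/compling_msc_exercises | methods_in_cl/annotations/Annotation_Analysis.py | create_N_kj
-- ===== SOURCE A (Python) =====
-- from typing import List, Set, Any, Dict  # typing hints
--
-- def create_N_kj(A: List[List[int]], K: Set[Any]) -> Dict[Any, List[int]]:
--     """
--     Create a dictionary that counts number of ratings per instance j for each category k.
--
--     Parameters:
--     A (List[List[int]]): The annotation matrix where rows represent annotators and columns represent instances.
--     K (Set[Any]): The set of categories
--
--     Returns:
--     Dict[Any, List[int]]: A dictionary where each key is category from K and the value is a list of counts,
--           where each count corresponds to the number of annotations of that category for each instance in A.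
--     """
--     N_kj = {}
--
--     J = list(range(len(A[0])))
--
--     for k in K:
--         # add one dictionary entry for each class so you can call them by class value, not index
--         N_kj[k] = []
--         # create one value for each instance j
--         for j in J:
--             n_kj = 0
--             # count how many annotators choose A
--             for i in range(len(A)):
--                 if A[i][j] == k:
--                     n_kj += 1
--             N_kj[k].append(n_kj)
--
--     return N_kj
-- ===== SOURCE B (Python) =====
-- from typing import List, Set, Any, Dict  # typing hints
--
-- def create_N_kj(A: List[List[int]], K: Set[Any]) -> Dict[Any, List[int]]:
--     # Single pass over the matrix: build one frequency table per column,
--     # then read each category's counts off the tables (O(I*J + |K|*J)).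
--     J = len(A[0])
--     col_counts = []
--     for j in range(J):
--         freq = {}
--         for row in A:
--             v = row[j]
--             freq[v] = freq.get(v, 0) + 1
--         col_counts.append(freq)
--     return {k: [f.get(k, 0) for f in col_counts] for k in K}
-- ===== Notes on version B (the rewrite author's own statement) =====
-- stated objective: faster
-- what changed: Replaces the triple loop (for each category, for each instance, scan all annotators) by one pass over the matrix building a frequency table per column, from which each category's counts are read off.
-- outside the precondition, e.g. on create_N_kj([[1, 2], [3]], set()): A returns {}, B raises IndexError
import Mathlib
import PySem

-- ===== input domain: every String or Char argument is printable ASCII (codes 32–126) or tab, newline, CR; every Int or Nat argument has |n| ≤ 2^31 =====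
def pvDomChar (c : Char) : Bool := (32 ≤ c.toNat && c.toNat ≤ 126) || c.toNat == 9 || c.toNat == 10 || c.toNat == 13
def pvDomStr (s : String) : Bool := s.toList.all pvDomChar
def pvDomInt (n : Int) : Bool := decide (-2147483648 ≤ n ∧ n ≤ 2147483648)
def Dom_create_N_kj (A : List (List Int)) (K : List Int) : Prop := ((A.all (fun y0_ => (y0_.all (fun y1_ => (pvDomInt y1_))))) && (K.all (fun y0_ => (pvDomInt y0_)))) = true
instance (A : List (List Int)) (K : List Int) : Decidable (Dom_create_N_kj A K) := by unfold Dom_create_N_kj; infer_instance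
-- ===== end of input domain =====

-- B replaces A's per-category-per-instance annotator scan by one pass building a per-column
-- frequency table, then reads each category's counts off the tables (objective: faster).


-- ===== PORT A =====
-- Literal port of A: dict N_kj; for each k in K insert [], then for each j append the
-- annotator-scan count.  'A[0]' raises IndexError on empty A (none branch, excluded by Pre_);
-- 'A[i][j]' is pyGetD with a default, exact on Pre_ (which excludes the raising inputs).
def create_N_kj (A : List (List Int)) (K : List Int) : List (Int × List Int) :=
  match PySem.List.pyGet? A 0 with
  | none => []  -- Python raises IndexError here (A == []); excluded by Pre_
  | some row0 =>
    let J := PySem.List.pyRange 0 (PySem.List.len row0) 1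
    (K.foldl (fun N_kj k =>
        let N_kj := PySem.Dict.insert N_kj k []
        J.foldl (fun N_kj j =>
            let n := (PySem.List.pyRange 0 (PySem.List.len A) 1).foldl
              (fun n i =>
                if PySem.List.pyGetD (PySem.List.pyGetD A i []) j 0 == k then n + 1 else n) 0
            PySem.Dict.modify N_kj k [] (fun l => l ++ [n])) N_kj)
      (PySem.Dict.empty : PySem.Dict Int (List Int))).items

-- ===== PORT B =====
-- Literal port of B: per-column frequency dicts, then a dict comprehension over K.
def create_N_kj_alt (A : List (List Int)) (K : List Int) : List (Int × List Int) :=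
  match PySem.List.pyGet? A 0 with
  | none => []  -- Python raises IndexError here (A == []); excluded by Pre_
  | some row0 =>
    let J := PySem.List.len row0
    let colCounts := (PySem.List.pyRange 0 J 1).foldl
      (fun cs j =>
        let freq := A.foldl
          (fun d row => PySem.Dict.modify d (PySem.List.pyGetD row j 0) 0 (· + 1))
          (PySem.Dict.empty : PySem.Dict Int Int)
        cs ++ [freq]) []
    (K.foldl (fun d k =>
        PySem.Dict.insert d k (colCounts.map (fun f => PySem.Dict.getD f k 0)))
      (PySem.Dict.empty : PySem.Dict Int (List Int))).items

-- ===== PRECONDITION & SPEC =====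
-- Pre_ excludes empty A (A[0] raises IndexError) and matrices with a row shorter than the
-- first row: there A raises too whenever some count is computed, and in the vacuous corner
-- (K empty, so A never indexes and returns {}) B itself raises IndexError scanning the columns.
def Pre_create_N_kj (A : List (List Int)) (K : List Int) : Prop :=
  A ≠ [] ∧ ∀ row ∈ A, (A.headD []).length ≤ row.length
instance (A : List (List Int)) (K : List Int) : Decidable (Pre_create_N_kj A K) := by
  unfold Pre_create_N_kj; infer_instance
def pvWitness_create_N_kj : List (List Int) × List Int := ([[0, 1], [1, 0]], [0, 1])
def Spec_create_N_kj (A : List (List Int)) (K : List Int) (out : List (Int × List Int)) : Prop := out = create_N_kj_alt A K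
instance (A : List (List Int)) (K : List Int) (out : List (Int × List Int)) : Decidable (Spec_create_N_kj A K out) := by unfold Spec_create_N_kj; infer_instance

-- ===== CLAIM (what is proved, stated in full; the proofs are below) =====
def Claim_equal_create_N_kj : Prop := ∀ (A : List (List Int)) (K : List Int), Dom_create_N_kj A K → Pre_create_N_kj A K → Spec_create_N_kj A K (create_N_kj A K)

-- ===== LEMMAS AND PROOFS =====

-- Appending J times to the freshly inserted key k is one insert of the whole list.
theorem pv_foldl_modify_insert (Jl : List Int) (d : PySem.Dict Int (List Int)) (k : Int)
    (l0 : List Int) (g : Int → Int) :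
    Jl.foldl (fun d' j => PySem.Dict.modify d' k [] (fun l => l ++ [g j]))
      (PySem.Dict.insert d k l0)
    = PySem.Dict.insert d k (l0 ++ Jl.map g) := by
  induction Jl generalizing l0 with
  | nil => simp
  | cons j t ih =>
    simp only [List.foldl_cons, List.map_cons]
    rw [show PySem.Dict.modify (d.insert k l0) k [] (fun l => l ++ [g j])
          = d.insert k (l0 ++ [g j]) by
        simp [PySem.Dict.modify, PySem.Dict.getD_insert_self, PySem.Dict.insert_insert_self]]
    rw [ih]; simp

-- A's annotator scan at column j counts k in the j-th column (with pyGetD defaults).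
theorem pv_countA (A : List (List Int)) (k j : Int) :
    (PySem.List.pyRange 0 (PySem.List.len A) 1).foldl
      (fun n i => if PySem.List.pyGetD (PySem.List.pyGetD A i []) j 0 == k then n + 1 else n) 0
    = ((A.map (fun row => PySem.List.pyGetD row j 0)).count k : Int) := by
  have h := PySem.List.foldl_pyRange_pyGetD (xs := A)
        (f := fun n row => if PySem.List.pyGetD row j 0 == k then n + 1 else n)
        (d := []) (init := (0 : Int)) (a := 0) (by norm_num)
  rw [h, Int.toNat_zero, List.drop_zero,
      ← List.foldl_map (f := fun row => PySem.List.pyGetD row j 0)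
        (g := fun n x => if x == k then n + 1 else n),
      PySem.List.foldl_beq_add_one]
  simp

-- B's column frequency table looks up the same count.
theorem pv_countB (A : List (List Int)) (k j : Int) :
    (A.foldl (fun d row => PySem.Dict.modify d (PySem.List.pyGetD row j 0) 0 (· + 1))
        (PySem.Dict.empty : PySem.Dict Int Int)).getD k 0
    = ((A.map (fun row => PySem.List.pyGetD row j 0)).count k : Int) := by
  rw [← List.foldl_map (f := fun row => PySem.List.pyGetD row j 0)
        (g := fun d x => PySem.Dict.modify d x 0 (· + 1))]
  simp [PySem.Dict.getD_foldl_modify_add_one]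

theorem create_N_kj_eq_alt (A : List (List Int)) (K : List Int) :
    create_N_kj A K = create_N_kj_alt A K := by
  unfold create_N_kj create_N_kj_alt
  cases hA : PySem.List.pyGet? A 0 with
  | none => rfl
  | some row0 =>
    simp only [PySem.List.foldl_append_singleton_eq_map, List.nil_append]
    congr 2
    funext d k
    rw [pv_foldl_modify_insert]
    simp only [List.nil_append, List.map_map]
    congr 1
    apply List.map_congr_left
    intro j _
    simp only [Function.comp]
    rw [pv_countA, pv_countB]

-- ===== VERDICT (by name: the statement is the Claim_ definition above) =====
theorem create_N_kj_spec : Claim_equal_create_N_kj := by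
  intro A K _ _
  unfold Spec_create_N_kj
  exact create_N_kj_eq_alt A K
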